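-- pv_equiv track=rewrite | github.com/zofialuther/CS8395-08-Paper1-updated | data/translated-code/pseudo-to-python/haskell/Fusc-sequence.py | go
-- ===== SOURCE A (Python) =====
-- def go(n):
--     if n == 0:
--         return (1, 0)
--     elif n % 2 == 0:
--         x, y = go(n // 2)
--         return (x + y, y)
--     else:
--         x, y = go((n-1) // 2)
--         return (x, x + y)
-- ===== SOURCE B (Python) =====
-- def go(n):
--     if n < 0:
--         raise ValueError("n must be non-negative")
--     bits = []
--     while n > 0:
--         bits.append(n % 2)
--         n //= 2
--     x, y = 1, 0
--     for b in reversed(bits):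
--         if b == 0:
--             x, y = x + y, y
--         else:
--             x, y = x, x + y
--     return (x, y)
-- ===== Notes on version B (the rewrite author's own statement) =====
-- stated objective: alternative
-- what changed: Replaces the recursive descent over the binary digits with an iterative loop: collect n's bits low-to-high, then fold over them high-to-low maintaining the running pair (x, y).
import Mathlib
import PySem

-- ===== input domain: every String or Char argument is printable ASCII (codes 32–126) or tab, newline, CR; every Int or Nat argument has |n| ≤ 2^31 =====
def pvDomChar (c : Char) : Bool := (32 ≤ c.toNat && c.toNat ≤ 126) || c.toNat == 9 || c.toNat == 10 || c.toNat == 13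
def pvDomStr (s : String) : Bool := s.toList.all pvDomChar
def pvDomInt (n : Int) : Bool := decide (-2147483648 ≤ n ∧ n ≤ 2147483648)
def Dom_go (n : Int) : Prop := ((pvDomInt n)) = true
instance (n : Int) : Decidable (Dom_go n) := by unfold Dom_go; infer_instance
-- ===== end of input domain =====

-- B replaces A's recursive descent with an iterative fold over n's binary digits (alternative decomposition, same cost).


-- ===== PORT A =====
-- literal port of A's recursion; the 'n < 0' guard only makes the definition total:
-- Python A never returns there (RecursionError), and such n are outside Pre_go.
def go (n : Int) : Int × Int :=
  if n = 0 then (1, 0)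
  else if h : n < 0 then (1, 0)
  else if PySem.Int.mod n 2 = 0 then
    let p := go (PySem.Int.floordiv n 2)
    (p.1 + p.2, p.2)
  else
    let p := go (PySem.Int.floordiv (n - 1) 2)
    (p.1, p.1 + p.2)
termination_by n.toNat
decreasing_by
  · have h2 : PySem.Int.floordiv n 2 = n / 2 := PySem.Int.floordiv_eq_ediv_of_pos (by omega)
    rw [h2]; omega
  · have h2 : PySem.Int.floordiv (n - 1) 2 = (n - 1) / 2 := PySem.Int.floordiv_eq_ediv_of_pos (by omega)
    rw [h2]; omega

-- ===== PORT B =====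
-- B raises ValueError on n < 0; those inputs are outside Pre_go, so the port only
-- transcribes B's returning path (bits loop + fold).
-- bits of n, least-significant first (B's while loop)
def goBits (n : Int) : List Int :=
  if h : n ≤ 0 then []
  else PySem.Int.mod n 2 :: goBits (PySem.Int.floordiv n 2)
termination_by n.toNat
decreasing_by
  have h2 : PySem.Int.floordiv n 2 = n / 2 := PySem.Int.floordiv_eq_ediv_of_pos (by omega)
  rw [h2]; omega

def goStep (p : Int × Int) (b : Int) : Int × Int :=
  if b = 0 then (p.1 + p.2, p.2) else (p.1, p.1 + p.2)

def go_alt (n : Int) : Int × Int :=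
  (goBits n).reverse.foldl goStep (1, 0)

-- ===== PRECONDITION & SPEC =====
-- Pre_go excludes negative n, on which Python A recurses forever (RecursionError) and B raises ValueError.
def Pre_go (n : Int) : Prop := 0 ≤ n
instance (n : Int) : Decidable (Pre_go n) := by unfold Pre_go; infer_instance
def pvWitness_go : Int := 11

def Spec_go (n : Int) (out : Int × Int) : Prop := out = go_alt n
instance (n : Int) (out : Int × Int) : Decidable (Spec_go n out) := by unfold Spec_go; infer_instance

-- ===== CLAIM (what is proved, stated in full; the proofs are below) =====
def Claim_equal_go : Prop := ∀ (n : Int), Dom_go n → Pre_go n → Spec_go n (go n)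

-- ===== LEMMAS AND PROOFS =====

-- unfold go_alt one bit: for n > 0, go_alt n = goStep (go_alt (n // 2)) (n % 2)
theorem go_alt_pos (n : Int) (h : 0 < n) :
    go_alt n = goStep (go_alt (PySem.Int.floordiv n 2)) (PySem.Int.mod n 2) := by
  unfold go_alt
  rw [goBits, dif_neg (by omega)]
  simp [List.foldl_concat]

theorem go_alt_zero : go_alt 0 = (1, 0) := by
  unfold go_alt; rw [goBits, dif_pos (by omega)]; rfl

theorem odd_half (n : Int) (h : 0 < n) (ho : ¬ PySem.Int.mod n 2 = 0) :
    PySem.Int.floordiv (n - 1) 2 = PySem.Int.floordiv n 2 := by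
  rw [PySem.Int.floordiv_eq_ediv_of_pos (a := n - 1) (by omega),
      PySem.Int.floordiv_eq_ediv_of_pos (a := n) (by omega)]
  have hm : PySem.Int.mod n 2 = n % 2 := PySem.Int.mod_eq_emod_of_pos (by omega)
  rw [hm] at ho
  omega

theorem go_eq_alt (n : Int) (h : 0 ≤ n) : go n = go_alt n := by
  by_cases h0 : n = 0
  · subst h0; rw [go]; simp [go_alt_zero]
  · have hp : 0 < n := lt_of_le_of_ne h (Ne.symm h0)
    have ih : go (PySem.Int.floordiv n 2) = go_alt (PySem.Int.floordiv n 2) := by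
      have hh : 0 ≤ PySem.Int.floordiv n 2 := by
        rw [PySem.Int.floordiv_eq_ediv_of_pos (by omega)]; omega
      exact go_eq_alt _ hh
    rw [go, if_neg h0, dif_neg (by omega), go_alt_pos n hp]
    by_cases he : PySem.Int.mod n 2 = 0
    · rw [if_pos he, ih]; simp only [goStep, if_pos he]
    · rw [if_neg he, odd_half n hp he, ih]; simp only [goStep, if_neg he]
termination_by n.toNat
decreasing_by
  have h2 : PySem.Int.floordiv n 2 = n / 2 := PySem.Int.floordiv_eq_ediv_of_pos (by omega)
  rw [h2] at *; omega

-- ===== VERDICT (by name: the statement is the Claim_ definition above) =====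
theorem go_spec : Claim_equal_go := by
  intro n _ hpre
  exact go_eq_alt n hpre
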